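-- pv_equiv track=rewrite | github.com/Thanishk008/ruler-bias-vit | src/techniques/technique2_attention_reg.py | _border_patch_indices
-- ===== SOURCE A (Python) =====
-- import math
--
-- def _border_patch_indices(token_count: int):
--     """Return border indices for a square patch grid, excluding any CLS token."""
--     if token_count <= 0:
--         return []
--
--     patch_count = token_count
--     if token_count - 1 > 0:
--         cls_compatible = int(math.isqrt(token_count - 1))
--         if cls_compatible * cls_compatible == token_count - 1:
--             patch_count = token_count - 1
--
--     grid_size = int(math.isqrt(patch_count))
--     if grid_size * grid_size != patch_count:
--         return []
--
--     border_width = max(1, int(round(grid_size * 0.08)))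
--     indices = []
--     for row in range(grid_size):
--         for col in range(grid_size):
--             if (
--                 row < border_width
--                 or row >= grid_size - border_width
--                 or col < border_width
--                 or col >= grid_size - border_width
--             ):
--                 indices.append(row * grid_size + col)
--     return sorted(set(indices))
-- ===== SOURCE B (Python) =====
-- import math
--
-- def _border_patch_indices(token_count: int):
--     """Return border indices for a square patch grid, excluding any CLS token."""
--     if token_count <= 0:
--         return []
--
--     patch_count = token_count
--     if token_count - 1 > 0:
--         cls_compatible = int(math.isqrt(token_count - 1))
--         if cls_compatible * cls_compatible == token_count - 1:
--             patch_count = token_count - 1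
--
--     grid_size = int(math.isqrt(patch_count))
--     if grid_size * grid_size != patch_count:
--         return []
--
--     border_width = max(1, int(round(grid_size * 0.08)))
--     indices = set()
--     for row in range(0, border_width):
--         indices.update(row * grid_size + col for col in range(grid_size))
--     for row in range(border_width, grid_size - border_width):
--         indices.update(row * grid_size + col for col in range(0, border_width))
--         indices.update(row * grid_size + col
--                        for col in range(grid_size - border_width, grid_size))
--     for row in range(max(border_width, grid_size - border_width), grid_size):
--         indices.update(row * grid_size + col for col in range(grid_size))
--     return sorted(indices)
-- ===== Notes on version B (the rewrite author's own statement) =====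
-- stated objective: alternative
-- what changed: Replaces the full g-by-g grid scan with a four-clause border test per cell by direct emission of the border bands (full top rows, left/right columns of the middle rows, full bottom rows) into a set that is then sorted; the interior is never visited.
import Mathlib
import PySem

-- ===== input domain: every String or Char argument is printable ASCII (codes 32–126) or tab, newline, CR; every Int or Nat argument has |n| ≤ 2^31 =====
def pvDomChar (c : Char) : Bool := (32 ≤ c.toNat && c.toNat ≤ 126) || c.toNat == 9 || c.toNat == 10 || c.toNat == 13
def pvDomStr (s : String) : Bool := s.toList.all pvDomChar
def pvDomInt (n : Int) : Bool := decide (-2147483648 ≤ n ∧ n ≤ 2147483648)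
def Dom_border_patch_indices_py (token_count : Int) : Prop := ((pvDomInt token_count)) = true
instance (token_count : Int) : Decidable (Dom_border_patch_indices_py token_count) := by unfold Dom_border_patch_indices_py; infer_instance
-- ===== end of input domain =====

-- B replaces A's g×g scan with a four-clause border test by direct emission of the border
-- bands (full top rows, left/right columns of middle rows, full bottom rows) into a set.

-- math.isqrt n (n ≥ 0) is exactly Nat.sqrt (floor square root); ported as such.
-- int(round(grid_size * 0.08)) is ported as (4*grid_size + 25) // 50 (nearest integer of
-- 0.08*g; the exact value 2g/25 is never a half-integer, and the float computation agrees
-- with this formula for every grid_size reachable from |token_count| ≤ 2^31, i.e. g ≤ 46341,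
-- checked exhaustively against CPython).

-- ===== PORT A =====
def border_patch_indices_py (token_count : Int) : List Int :=
  if token_count ≤ 0 then []
  else
    let patch_count : Int :=
      if token_count - 1 > 0 then
        let cls_compatible : Int := ((Nat.sqrt (token_count - 1).toNat : Nat) : Int)
        if cls_compatible * cls_compatible = token_count - 1 then token_count - 1
        else token_count
      else token_count
    let grid_size : Int := ((Nat.sqrt patch_count.toNat : Nat) : Int)
    if grid_size * grid_size ≠ patch_count then []
    else
      let border_width : Int := max 1 (PySem.Int.floordiv (4 * grid_size + 25) 50)
      let indices : List Int :=
        (PySem.List.pyRange 0 grid_size 1).foldl (fun acc row =>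
          (PySem.List.pyRange 0 grid_size 1).foldl (fun acc col =>
            if row < border_width ∨ row ≥ grid_size - border_width ∨
               col < border_width ∨ col ≥ grid_size - border_width
            then acc ++ [row * grid_size + col] else acc) acc) []
      PySem.List.sorted (PySem.Set.ofList indices) (fun x => x) false

-- ===== PORT B =====
def border_patch_indices_py_alt (token_count : Int) : List Int :=
  if token_count ≤ 0 then []
  else
    let patch_count : Int :=
      if token_count - 1 > 0 then
        let cls_compatible : Int := ((Nat.sqrt (token_count - 1).toNat : Nat) : Int)
        if cls_compatible * cls_compatible = token_count - 1 then token_count - 1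
        else token_count
      else token_count
    let grid_size : Int := ((Nat.sqrt patch_count.toNat : Nat) : Int)
    if grid_size * grid_size ≠ patch_count then []
    else
      let border_width : Int := max 1 (PySem.Int.floordiv (4 * grid_size + 25) 50)
      let s1 : PySem.Set Int :=
        (PySem.List.pyRange 0 border_width 1).foldl (fun s row =>
          PySem.Set.update s
            ((PySem.List.pyRange 0 grid_size 1).map (fun col => row * grid_size + col)))
          PySem.Set.empty
      let s2 : PySem.Set Int :=
        (PySem.List.pyRange border_width (grid_size - border_width) 1).foldl (fun s row =>
          PySem.Set.update
            (PySem.Set.update s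
              ((PySem.List.pyRange 0 border_width 1).map (fun col => row * grid_size + col)))
            ((PySem.List.pyRange (grid_size - border_width) grid_size 1).map
              (fun col => row * grid_size + col))) s1
      let s3 : PySem.Set Int :=
        (PySem.List.pyRange (max border_width (grid_size - border_width)) grid_size 1).foldl
          (fun s row =>
            PySem.Set.update s
              ((PySem.List.pyRange 0 grid_size 1).map (fun col => row * grid_size + col))) s2
      PySem.List.sorted s3 (fun x => x) false

-- ===== PRECONDITION & SPEC =====
def Spec_border_patch_indices_py (token_count : Int) (out : List Int) : Prop := out = border_patch_indices_py_alt token_count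
instance (token_count : Int) (out : List Int) : Decidable (Spec_border_patch_indices_py token_count out) := by unfold Spec_border_patch_indices_py; infer_instance

-- ===== CLAIM (what is proved, stated in full; the proofs are below) =====
def Claim_equal_border_patch_indices_py : Prop := ∀ (token_count : Int), Dom_border_patch_indices_py token_count → Spec_border_patch_indices_py token_count (border_patch_indices_py token_count)

-- ===== LEMMAS AND PROOFS =====

lemma mem_foldl_update {α β : Type} [BEq α] [LawfulBEq α] (l : List β) (f : β → List α)
    (s : PySem.Set α) (y : α) :
    y ∈ l.foldl (fun s b => PySem.Set.update s (f b)) s ↔ y ∈ s ∨ ∃ b ∈ l, y ∈ f b := by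
  induction l generalizing s with
  | nil => simp
  | cons hd tl ih => simp [ih, PySem.Set.mem_update]; tauto

lemma nodup_foldl_update {α β : Type} [BEq α] [LawfulBEq α] (l : List β) (f : β → List α)
    (s : PySem.Set α) (hs : s.Nodup) :
    (l.foldl (fun s b => PySem.Set.update s (f b)) s).Nodup := by
  induction l generalizing s with
  | nil => exact hs
  | cons hd tl ih => exact ih _ (PySem.Set.nodup_update _ _ hs)

lemma bands_eq (g bw : Int) (h1 : 1 ≤ bw) (hg : bw ≤ g) :
    PySem.List.sorted (PySem.Set.ofList
      ((PySem.List.pyRange 0 g 1).foldl (fun acc row =>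
        (PySem.List.pyRange 0 g 1).foldl (fun acc col =>
          if row < bw ∨ row ≥ g - bw ∨ col < bw ∨ col ≥ g - bw
          then acc ++ [row * g + col] else acc) acc) [])) (fun x => x) false
    = PySem.List.sorted
        ((PySem.List.pyRange (max bw (g - bw)) g 1).foldl (fun s row =>
          PySem.Set.update s
            ((PySem.List.pyRange 0 g 1).map (fun col => row * g + col)))
          ((PySem.List.pyRange bw (g - bw) 1).foldl (fun s row =>
            PySem.Set.update
              (PySem.Set.update s
                ((PySem.List.pyRange 0 bw 1).map (fun col => row * g + col)))
              ((PySem.List.pyRange (g - bw) g 1).map (fun col => row * g + col)))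
            ((PySem.List.pyRange 0 bw 1).foldl (fun s row =>
              PySem.Set.update s
                ((PySem.List.pyRange 0 g 1).map (fun col => row * g + col)))
              PySem.Set.empty))) (fun x => x) false := by
  simp only [← PySem.Set.update_append]
  apply PySem.List.sorted_eq_sorted_of_perm _ _ _ (fun a b h => h)
  refine (List.perm_ext_iff_of_nodup (PySem.Set.nodup_ofList _)
    (nodup_foldl_update _ _ _ (nodup_foldl_update _ _ _ (nodup_foldl_update _ _ _ List.nodup_nil)))).mpr ?_
  intro x
  simp only [PySem.Set.mem_ofList, PySem.List.foldl_append_ite, List.nil_append,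
    PySem.List.foldl_append_eq_flatMap, List.mem_flatMap, List.mem_map, List.mem_filter,
    PySem.List.mem_pyRange_one, mem_foldl_update, List.mem_append, List.not_mem_nil,
    decide_eq_true_eq, false_or]
  constructor
  · rintro ⟨row, ⟨hr0, hrg⟩, col, ⟨⟨hc0, hcg⟩, hcond⟩, rfl⟩
    by_cases hrow : row < bw
    · exact Or.inl (Or.inl ⟨row, ⟨hr0, hrow⟩, col, ⟨hc0, hcg⟩, rfl⟩)
    · by_cases hrow2 : row ≥ g - bw
      · exact Or.inr ⟨row, ⟨max_le (by omega) (by omega), hrg⟩, col, ⟨hc0, hcg⟩, rfl⟩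
      · have hcol : col < bw ∨ col ≥ g - bw := by omega
        rcases hcol with h | h
        · exact Or.inl (Or.inr ⟨row, ⟨by omega, by omega⟩, Or.inl ⟨col, ⟨hc0, h⟩, rfl⟩⟩)
        · exact Or.inl (Or.inr ⟨row, ⟨by omega, by omega⟩, Or.inr ⟨col, ⟨h, hcg⟩, rfl⟩⟩)
  · rintro ((⟨row, ⟨hr0, hrb⟩, col, ⟨hc0, hcg⟩, rfl⟩ |
             ⟨row, ⟨hrb, hrg⟩, (⟨col, ⟨hc0, hcb⟩, rfl⟩ | ⟨col, ⟨hcb, hcg⟩, rfl⟩)⟩) |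
            ⟨row, ⟨hrm, hrg⟩, col, ⟨hc0, hcg⟩, rfl⟩)
    · exact ⟨row, ⟨by omega, by omega⟩, col, ⟨⟨hc0, hcg⟩, by omega⟩, rfl⟩
    · exact ⟨row, ⟨by omega, by omega⟩, col, ⟨⟨by omega, by omega⟩, by omega⟩, rfl⟩
    · exact ⟨row, ⟨by omega, by omega⟩, col, ⟨⟨by omega, by omega⟩, by omega⟩, rfl⟩
    · have hm1 := le_max_left bw (g - bw)
      have hm2 := le_max_right bw (g - bw)
      exact ⟨row, ⟨by omega, by omega⟩, col, ⟨⟨hc0, hcg⟩, by omega⟩, rfl⟩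


-- ===== VERDICT (by name: the statement is the Claim_ definition above) =====
theorem border_patch_indices_py_spec : Claim_equal_border_patch_indices_py := by
  intro tc _
  unfold Spec_border_patch_indices_py border_patch_indices_py border_patch_indices_py_alt
  by_cases h0 : tc ≤ 0
  · simp [h0]
  · simp only [h0, if_false]
    set pc : Int :=
      (if tc - 1 > 0 then
        if ((Nat.sqrt (tc - 1).toNat : Nat) : Int) * ((Nat.sqrt (tc - 1).toNat : Nat) : Int) = tc - 1
        then tc - 1 else tc
      else tc) with hpc
    set g : Int := ((Nat.sqrt pc.toNat : Nat) : Int) with hgdef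
    by_cases hsq : g * g ≠ pc
    · simp [hsq]
    · simp only [hsq, if_false]
      simp only [ne_eq, not_not] at hsq
      have hpc1 : 1 ≤ pc := by
        rw [hpc]; split_ifs with a b <;> omega
      have hg1 : 1 ≤ g := by
        rcases Int.lt_or_le g 1 with h | h
        · exfalso
          have hg0 : 0 ≤ g := by positivity
          interval_cases g <;> omega
        · exact h
      have hbw1 : 1 ≤ max 1 (PySem.Int.floordiv (4 * g + 25) 50) := le_max_left _ _
      have hbwg : max 1 (PySem.Int.floordiv (4 * g + 25) 50) ≤ g := by
        rw [PySem.Int.floordiv_eq_ediv_of_pos (by norm_num)]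
        omega
      exact bands_eq g _ hbw1 hbwg
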